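-- pv_equiv track=rewrite | github.com/aryabiju37/Bio-Informatics | motif_builder.py | some_fn
-- ===== SOURCE A (Python) =====
-- def some_fn(inc,dna,motif,max_edit_distance):
--     str_i = ""
--     str_j = ""
--     out = []
--     for i in range(inc,len(dna)):
--         str_i += dna[i]
--         str_j = ""
--         str_insert = ""
--         for j in range(len(motif)):
--             str_j += motif[j]
--             if(str_i in str_j):
--                 out.append(len(str_i))
--                 str_j = ""
--
--         str_insert = motif+dna[len(motif)-1+max_edit_distance]
--         if(str_i == str_insert):
--             out.append(len(str_i))
--     return out
-- ===== SOURCE B (Python) =====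
-- def some_fn(inc, dna, motif, max_edit_distance):
--     # Different algorithm: precompute, once, the longest-common-prefix table
--     # lcp[j] = length of the longest common prefix of motif[j:] and S (= the
--     # scanned part of dna).  An occurrence of the length-k prefix S[:k] at
--     # motif position j is then just the integer test lcp[j] >= k, so each
--     # prefix's non-overlapping count is a greedy jump scan over integers,
--     # with no string comparisons at all.
--     S = "".join(dna[i] for i in range(inc, len(dna)))
--     m = len(motif)
--     lcp = []
--     for j in range(m):
--         l = 0
--         while j + l < m and l < len(S) and motif[j + l] == S[l]:
--             l += 1
--         lcp.append(l)
--     out = []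
--     for k in range(1, len(S) + 1):
--         j = 0
--         while j + k <= m:
--             if lcp[j] >= k:
--                 out.append(k)
--                 j += k
--             else:
--                 j += 1
--         if S[:k] == motif + dna[m - 1 + max_edit_distance]:
--             out.append(k)
--     return out
-- ===== Notes on version B (the rewrite author's own statement) =====
-- stated objective: alternative
-- what changed: Instead of re-scanning motif with A's grow-and-reset string buffer for every prefix, B precomputes once an LCP table (lcp[j] = longest common prefix of motif[j:] and the scanned dna part) and counts each prefix's non-overlapping occurrences by a greedy jump scan over these integers, with no string comparisons in the counting loop.
import Mathlib
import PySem

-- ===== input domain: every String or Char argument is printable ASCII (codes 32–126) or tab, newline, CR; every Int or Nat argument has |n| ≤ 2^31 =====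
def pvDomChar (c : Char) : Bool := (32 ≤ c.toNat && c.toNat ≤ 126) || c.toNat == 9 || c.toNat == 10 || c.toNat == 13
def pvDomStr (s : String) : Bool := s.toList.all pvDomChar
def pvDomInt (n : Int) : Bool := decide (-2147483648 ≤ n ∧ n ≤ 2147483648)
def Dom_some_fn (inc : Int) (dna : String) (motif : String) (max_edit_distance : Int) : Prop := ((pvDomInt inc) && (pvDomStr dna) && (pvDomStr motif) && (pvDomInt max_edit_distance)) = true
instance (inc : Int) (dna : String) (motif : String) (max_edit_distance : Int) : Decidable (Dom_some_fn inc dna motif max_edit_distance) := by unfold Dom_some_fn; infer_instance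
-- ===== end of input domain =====

-- B replaces A's per-prefix grow-and-reset scans by one precomputed LCP table plus integer greedy-jump counting (alternative algorithm, same return value).

-- ===== PORT A =====
-- inner 'for j in range(len(motif))' body of A: str_j += motif[j]; if str_i in str_j: append len(str_i), str_j = ""
def someFnInnerA (p : List Char) (L : Int) (acc : List Char × List Int) (c : Char) : List Char × List Int :=
  let j' := acc.1 ++ [c]
  if PySem.Chars.isIn p j' then ([], acc.2 ++ [L]) else (j', acc.2)

-- outer loop body of A (str_insert is recomputed each iteration, as in the Python)
def someFnStepA (ds ms : List Char) (max_edit_distance : Int) (acc : List Char × List Int) (i : Int) : List Char × List Int :=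
  let si := acc.1 ++ [(PySem.Chars.pyGet? ds i).getD ' ']
  let L : Int := (si.length : Int)
  let r := ms.foldl (someFnInnerA si L) ([], acc.2)
  let ins := ms ++ [(PySem.Chars.pyGet? ds ((ms.length : Int) - 1 + max_edit_distance)).getD ' ']
  (si, if si = ins then r.2 ++ [L] else r.2)

def some_fn (inc : Int) (dna : String) (motif : String) (max_edit_distance : Int) : List Int :=
  let ds := dna.toList
  let ms := motif.toList
  -- dna[i] via pyGet?; the default is unreachable under Pre_ (Python raises IndexError there)
  ((PySem.List.pyRange inc (ds.length : Int) 1).foldl (someFnStepA ds ms max_edit_distance) ([], [])).2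

-- ===== PORT B =====
-- B's inner while loop computing lcp[j]; fuel only bounds the iteration count (S.length suffices)
def lcpAt (ms S : List Char) (j : Nat) : Nat → Nat → Nat
  | 0, l => l
  | f + 1, l =>
    if j + l < ms.length ∧ l < S.length ∧ ms.getD (j + l) ' ' = S.getD l ' ' then
      lcpAt ms S j f (l + 1)
    else l

-- B's greedy jump scan for the prefix of length k0+1 (Python's k, always ≥ 1); fuel m+1 suffices
def bCount (lcp : List Nat) (m k0 : Nat) : Nat → Nat → Nat
  | 0, _ => 0
  | f + 1, j =>
    if j + (k0 + 1) ≤ m then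
      if k0 + 1 ≤ lcp.getD j 0 then 1 + bCount lcp m k0 f (j + (k0 + 1))
      else bCount lcp m k0 f (j + 1)
    else 0

def some_fn_alt (inc : Int) (dna : String) (motif : String) (max_edit_distance : Int) : List Int :=
  let ds := dna.toList
  let ms := motif.toList
  let S := (PySem.List.pyRange inc (ds.length : Int) 1).map (fun i => (PySem.Chars.pyGet? ds i).getD ' ')
  let m := ms.length
  let lcp := (List.range m).map (fun j => lcpAt ms S j S.length 0)
  (List.range S.length).foldl (fun out k0 =>
    let out' := out ++ List.replicate (bCount lcp m k0 (m + 1) 0) ((k0 + 1 : Nat) : Int)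
    let ins := ms ++ [(PySem.Chars.pyGet? ds ((m : Int) - 1 + max_edit_distance)).getD ' ']
    if S.take (k0 + 1) = ins then out' ++ [((k0 + 1 : Nat) : Int)] else out') []

-- ===== PRECONDITION & SPEC =====
-- Pre_ excludes exactly the inputs where the Python A raises IndexError: when the loop runs
-- (inc < len(dna)) every dna[i] and dna[len(motif)-1+max_edit_distance] must be a valid Python index.
def Pre_some_fn (inc : Int) (dna : String) (motif : String) (max_edit_distance : Int) : Prop :=
  let n : Int := (dna.toList.length : Int)
  let idx : Int := (motif.toList.length : Int) - 1 + max_edit_distance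
  n ≤ inc ∨ (-n ≤ inc ∧ -n ≤ idx ∧ idx < n)
instance (inc : Int) (dna : String) (motif : String) (max_edit_distance : Int) : Decidable (Pre_some_fn inc dna motif max_edit_distance) := by unfold Pre_some_fn; infer_instance

def pvWitness_some_fn : Int × String × String × Int := (0, "ab", "a", 1)

def Spec_some_fn (inc : Int) (dna : String) (motif : String) (max_edit_distance : Int) (out : List Int) : Prop := out = some_fn_alt inc dna motif max_edit_distance
instance (inc : Int) (dna : String) (motif : String) (max_edit_distance : Int) (out : List Int) : Decidable (Spec_some_fn inc dna motif max_edit_distance out) := by unfold Spec_some_fn; infer_instance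

-- ===== CLAIM (what is proved, stated in full; the proofs are below) =====
def Claim_equal_some_fn : Prop := ∀ (inc : Int) (dna : String) (motif : String) (max_edit_distance : Int), Dom_some_fn inc dna motif max_edit_distance → Pre_some_fn inc dna motif max_edit_distance → Spec_some_fn inc dna motif max_edit_distance (some_fn inc dna motif max_edit_distance)

-- ===== LEMMAS AND PROOFS =====

-- greedy non-overlapping count of p in s, as a structural recursion (common meeting point of both ports)
def pvC (p : List Char) : List Char → Nat
  | [] => 0
  | c :: t => if p.isPrefixOf (c :: t) then 1 + pvC p (t.drop (p.length - 1)) else pvC p t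
termination_by s => s.length
decreasing_by
  · simp only [List.length_drop, List.length_cons]; omega
  · simp

-- A's inner loop as a count: grow window j, count 1 and reset when p appears
def pvG (p : List Char) : List Char → List Char → Nat
  | _, [] => 0
  | j, c :: rest => if PySem.Chars.isIn p (j ++ [c]) then 1 + pvG p [] rest else pvG p (j ++ [c]) rest

-- both programs' per-prefix output, written once: for each new char, emit the count then the str_insert check
def pvCanon (ms ins : List Char) : List Char → List Char → List Int
  | _, [] => []
  | p, c :: rest =>
      let si := p ++ [c]
      List.replicate (pvC si ms) ((si.length : Int)) ++
        (if si = ins then [((si.length : Int))] else []) ++ pvCanon ms ins si rest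

theorem pvC_zero (p : List Char) : ∀ s, ¬ p <:+: s → pvC p s = 0 := by
  intro s
  induction s with
  | nil => intro _; rw [pvC]
  | cons c t ih =>
    intro hno
    rw [pvC]
    have hpre : p.isPrefixOf (c :: t) = false := by
      by_contra h
      exact hno ((List.isPrefixOf_iff_prefix.mp (by simpa using h)).isInfix)
    rw [hpre]
    simp only [Bool.false_eq_true, if_false]
    exact ih (fun h => hno (h.trans (List.suffix_cons c t).isInfix))

theorem pv_suffix_of_snoc (p j : List Char) (c : Char)
    (h : p <:+: j ++ [c]) (hno : ¬ p <:+: j) : p <:+ j ++ [c] := by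
  obtain ⟨a, b, hab⟩ := h
  rcases List.eq_nil_or_concat b with rfl | ⟨b', d, rfl⟩
  · exact ⟨a, by simpa using hab⟩
  · exfalso
    have : (a ++ p ++ b') ++ [d] = j ++ [c] := by simpa [List.append_assoc] using hab
    have hj : a ++ p ++ b' = j := (List.append_inj' this rfl).1
    exact hno ⟨a, b', hj⟩

theorem pv_no_early (p j rest : List Char) (k : Nat)
    (hk : k + p.length ≤ j.length)
    (h : p.isPrefixOf ((j ++ rest).drop k) = true) : p <:+: j := by
  have hpre : p <+: (j ++ rest).drop k := List.isPrefixOf_iff_prefix.mp h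
  have hda : (j ++ rest).drop k = j.drop k ++ rest := List.drop_append_of_le_length (by omega)
  rw [hda] at hpre
  have htake : p = (j.drop k ++ rest).take p.length := List.prefix_iff_eq_take.mp hpre
  have hlen : p.length ≤ (j.drop k).length := by simp [List.length_drop]; omega
  rw [List.take_append_of_le_length hlen] at htake
  have : p <+: j.drop k := htake ▸ List.take_prefix _ _
  exact this.isInfix.trans (List.drop_suffix k j).isInfix

theorem pvC_step (p : List Char) (hp : p ≠ []) :
    ∀ (m : Nat) (s : List Char),
      p.isPrefixOf (s.drop m) = true →
      (∀ k, k < m → p.isPrefixOf (s.drop k) = false) →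
      pvC p s = 1 + pvC p (s.drop (m + p.length)) := by
  intro m
  induction m with
  | zero =>
    intro s hpre _
    simp only [List.drop_zero] at hpre
    cases s with
    | nil =>
      exfalso
      have := List.isPrefixOf_iff_prefix.mp hpre
      exact hp (List.prefix_nil.mp this)
    | cons c t =>
      rw [pvC, hpre]
      simp only [if_true]
      have hlp : p.length = (p.length - 1) + 1 := by
        cases p with
        | nil => exact absurd rfl hp
        | cons a b => simp
      have : (c :: t).drop (0 + p.length) = t.drop (p.length - 1) := by
        rw [Nat.zero_add, hlp]; simp
      rw [this]
  | succ m ih =>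
    intro s hpre hno
    cases s with
    | nil =>
      exfalso
      simp only [List.drop_nil] at hpre
      exact hp (List.prefix_nil.mp (List.isPrefixOf_iff_prefix.mp hpre))
    | cons c t =>
      have h0 : p.isPrefixOf (c :: t) = false := by simpa using hno 0 (Nat.succ_pos m)
      rw [pvC, h0]
      simp only [Bool.false_eq_true, if_false]
      have hpre' : p.isPrefixOf (t.drop m) = true := by simpa using hpre
      have hno' : ∀ k, k < m → p.isPrefixOf (t.drop k) = false := by
        intro k hk
        simpa using hno (k + 1) (by omega)
      rw [ih t hpre' hno']
      congr 2
      simp [Nat.succ_add]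

theorem pvG_eq_pvC (p : List Char) (hp : p ≠ []) :
    ∀ (rest j : List Char), ¬ p <:+: j → pvG p j rest = pvC p (j ++ rest) := by
  intro rest
  induction rest with
  | nil =>
    intro j hno
    rw [pvG, List.append_nil, pvC_zero p j hno]
  | cons c rest ih =>
    intro j hno
    have hsplit : j ++ c :: rest = (j ++ [c]) ++ rest := by simp
    rw [pvG, hsplit]
    by_cases h : PySem.Chars.isIn p (j ++ [c]) = true
    · simp only [h, if_true]
      have hinf : p <:+: j ++ [c] := (PySem.Chars.isIn_iff_infix p _).mp h
      have hsuf : p <:+ j ++ [c] := pv_suffix_of_snoc p j c hinf hno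
      obtain ⟨q, hq⟩ := hsuf
      have hnil : ¬ p <:+: ([] : List Char) := fun hx => hp (List.infix_nil.mp hx)
      rw [ih [] hnil, List.nil_append]
      have hlenj : q.length + p.length = (j ++ [c]).length := by
        rw [← hq]; simp
      have hm : p.isPrefixOf (((j ++ [c]) ++ rest).drop q.length) = true := by
        have : ((j ++ [c]) ++ rest).drop q.length = p ++ rest := by
          rw [← hq, List.append_assoc, List.drop_append_of_le_length (by simp)]
          simp
        rw [this]
        exact List.isPrefixOf_iff_prefix.mpr (List.prefix_append p rest)
      have hnoearly : ∀ k, k < q.length → p.isPrefixOf (((j ++ [c]) ++ rest).drop k) = false := by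
        intro k hk
        by_contra hcon
        have hcon' : p.isPrefixOf ((j ++ (c :: rest)).drop k) = true := by
          rw [← hsplit] at hcon
          simpa using hcon
        have hkp : k + p.length ≤ j.length := by
          have : (j ++ [c]).length = j.length + 1 := by simp
          omega
        exact hno (pv_no_early p j (c :: rest) k hkp hcon')
      rw [pvC_step p hp q.length _ hm hnoearly, hlenj, List.drop_left]
    · have h' : PySem.Chars.isIn p (j ++ [c]) = false := by simp only [Bool.not_eq_true] at h; exact h
      simp only [h', Bool.false_eq_true, if_false]
      have hno' : ¬ p <:+: j ++ [c] := (PySem.Chars.isIn_eq_false_iff p _).mp h'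
      exact ih (j ++ [c]) hno'

theorem inner_fold (p : List Char) (L : Int) :
    ∀ (ms j : List Char) (o : List Int),
      (ms.foldl (someFnInnerA p L) (j, o)).2 = o ++ List.replicate (pvG p j ms) L := by
  intro ms
  induction ms with
  | nil => intro j o; rw [pvG]; simp
  | cons c ms ih =>
    intro j o
    rw [pvG]
    simp only [List.foldl_cons, someFnInnerA]
    by_cases h : PySem.Chars.isIn p (j ++ [c]) = true
    · simp only [h, if_true]
      rw [ih [] (o ++ [L])]
      simp [List.replicate_succ, Nat.add_comm]
    · have h' : PySem.Chars.isIn p (j ++ [c]) = false := by simp only [Bool.not_eq_true] at h; exact h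
      simp only [h', Bool.false_eq_true, if_false]
      rw [ih (j ++ [c]) o]

-- A's outer fold equals the canonical per-prefix output
theorem a_fold_canon (ds ms : List Char) (med : Int) :
    ∀ (is : List Int) (p : List Char) (out : List Int),
      (is.foldl (someFnStepA ds ms med) (p, out)).2
        = out ++ pvCanon ms (ms ++ [(PySem.Chars.pyGet? ds ((ms.length : Int) - 1 + med)).getD ' ']) p
            (is.map (fun i => (PySem.Chars.pyGet? ds i).getD ' ')) := by
  intro is
  induction is with
  | nil => intro p out; simp [pvCanon]
  | cons i is ih =>
    intro p out
    simp only [List.foldl_cons, List.map_cons, pvCanon, someFnStepA]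
    rw [ih]
    have hne : p ++ [(PySem.Chars.pyGet? ds i).getD ' '] ≠ [] := by simp
    rw [inner_fold]
    rw [pvG_eq_pvC _ hne ms [] (fun hx => hne (List.infix_nil.mp hx)), List.nil_append]
    split_ifs with h <;> simp [List.append_assoc]

-- common prefix length, structurally
def pvLcpLen : List Char → List Char → Nat
  | a :: as, b :: bs => if a = b then 1 + pvLcpLen as bs else 0
  | _, _ => 0

theorem lcpAt_eq (ms S : List Char) (j : Nat) :
    ∀ (f l : Nat), S.length - l ≤ f →
      lcpAt ms S j f l = l + pvLcpLen (ms.drop (j + l)) (S.drop l) := by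
  intro f
  induction f with
  | zero =>
    intro l h
    rw [lcpAt]
    have hl : S.length ≤ l := by omega
    have : S.drop l = [] := List.drop_eq_nil_of_le hl
    rw [this]
    cases ms.drop (j + l) <;> simp [pvLcpLen]
  | succ f ih =>
    intro l h
    rw [lcpAt]
    by_cases hc : j + l < ms.length ∧ l < S.length ∧ ms.getD (j + l) ' ' = S.getD l ' '
    · rw [if_pos hc]
      obtain ⟨h1, h2, h3⟩ := hc
      rw [ih (l + 1) (by omega)]
      have hm : ms.drop (j + l) = ms[j + l] :: ms.drop (j + l + 1) := List.drop_eq_getElem_cons h1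
      have hs : S.drop l = S[l] :: S.drop (l + 1) := List.drop_eq_getElem_cons h2
      have heq : ms[j + l] = S[l] := by
        have := h3
        rwa [List.getD_eq_getElem _ _ h1, List.getD_eq_getElem _ _ h2] at this
      rw [hm, hs, pvLcpLen, if_pos heq]
      have : j + (l + 1) = j + l + 1 := by omega
      rw [this]
      omega
    · rw [if_neg hc]
      -- head mismatch or one side empty: pvLcpLen = 0
      rcases Nat.lt_or_ge l S.length with h2 | h2
      · rcases Nat.lt_or_ge (j + l) ms.length with h1 | h1
        · have heq : ms[j + l] ≠ S[l] := by
            intro he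
            exact hc ⟨h1, h2, by rw [List.getD_eq_getElem _ _ h1, List.getD_eq_getElem _ _ h2, he]⟩
          rw [List.drop_eq_getElem_cons h1, List.drop_eq_getElem_cons h2, pvLcpLen, if_neg heq]
          omega
        · rw [List.drop_eq_nil_of_le h1]
          simp [pvLcpLen]
      · rw [List.drop_eq_nil_of_le h2]
        cases ms.drop (j + l) <;> simp [pvLcpLen]

theorem pvLcpLen_ge_iff : ∀ (k : Nat) (xs ys : List Char), k ≤ ys.length →
    (k ≤ pvLcpLen xs ys ↔ (ys.take k).isPrefixOf xs = true) := by
  intro k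
  induction k with
  | zero => intro xs ys _; simp
  | succ k ih =>
    intro xs ys hk
    cases ys with
    | nil => simp at hk
    | cons b bs =>
      cases xs with
      | nil =>
        simp [pvLcpLen]
      | cons a as =>
        rw [pvLcpLen]
        by_cases hab : a = b
        · subst hab
          rw [if_pos rfl]
          simp only [List.take_succ_cons, List.isPrefixOf_cons₂_self]
          rw [← ih as bs (by simpa using hk)]
          omega
        · rw [if_neg hab]
          have : (b :: bs).take (k + 1) = b :: bs.take k := by simp
          rw [this]
          simp only [List.isPrefixOf]
          constructor
          · omega
          · intro h
            have : (b == a) = true := by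
              cases hba : (b == a) <;> simp [hba] at h; rfl
            exact absurd (beq_iff_eq.mp this).symm hab

theorem bCount_eq_pvC (ms S : List Char) (k0 : Nat) (hk : k0 + 1 ≤ S.length) :
    ∀ (f j : Nat), ms.length - j ≤ f →
      bCount ((List.range ms.length).map (fun j => lcpAt ms S j S.length 0)) ms.length k0 f j
        = pvC (S.take (k0 + 1)) (ms.drop j) := by
  have hplen : (S.take (k0 + 1)).length = k0 + 1 := by simp; omega
  have hpne : S.take (k0 + 1) ≠ [] := by
    intro h; rw [h] at hplen; simp at hplen
  intro f
  induction f with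
  | zero =>
    intro j h
    rw [bCount]
    rw [List.drop_eq_nil_of_le (by omega), pvC]
  | succ f ih =>
    intro j h
    rw [bCount]
    by_cases hcond : j + (k0 + 1) ≤ ms.length
    · rw [if_pos hcond]
      have hj : j < ms.length := by omega
      have hget : ((List.range ms.length).map (fun j => lcpAt ms S j S.length 0)).getD j 0
          = lcpAt ms S j S.length 0 := by
        rw [List.getD_eq_getElem _ _ (by simpa using hj)]
        simp
      have hiff : (k0 + 1 ≤ lcpAt ms S j S.length 0) ↔ (S.take (k0 + 1)).isPrefixOf (ms.drop j) = true := by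
        rw [lcpAt_eq ms S j S.length 0 (by omega), Nat.add_zero, List.drop_zero, Nat.zero_add]
        exact pvLcpLen_ge_iff (k0 + 1) (ms.drop j) S hk
      have hdrop : ms.drop j = ms[j] :: ms.drop (j + 1) := List.drop_eq_getElem_cons hj
      by_cases hle : k0 + 1 ≤ lcpAt ms S j S.length 0
      · rw [if_pos (by rw [hget]; exact hle)]
        have hpre : (S.take (k0 + 1)).isPrefixOf (ms.drop j) = true := hiff.mp hle
        rw [hdrop, pvC]
        rw [hdrop] at hpre
        rw [if_pos hpre, hplen]
        have : (ms.drop (j + 1)).drop (k0 + 1 - 1) = ms.drop (j + (k0 + 1)) := by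
          rw [List.drop_drop]; congr 1; omega
        rw [this, ih (j + (k0 + 1)) (by omega)]
      · rw [if_neg (by rw [hget]; exact hle)]
        have hpre : (S.take (k0 + 1)).isPrefixOf (ms.drop j) = false := by
          cases hx : (S.take (k0 + 1)).isPrefixOf (ms.drop j)
          · rfl
          · exact absurd (hiff.mpr hx) hle
        rw [hdrop, pvC]
        rw [hdrop] at hpre
        rw [hpre]
        simp only [Bool.false_eq_true, if_false]
        exact ih (j + 1) (by omega)
    · rw [if_neg hcond]
      -- prefix longer than the remaining motif: pvC is 0
      have : ¬ (S.take (k0 + 1)) <:+: ms.drop j := by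
        intro hinf
        have := hinf.length_le
        rw [hplen, List.length_drop] at this
        omega
      rw [pvC_zero _ _ this]

-- B's range fold equals the canonical per-prefix output
theorem b_fold_canon (ms ins : List Char) :
    ∀ (S q : List Char) (out : List Int),
      (List.range S.length).foldl (fun o k0 =>
        let si := q ++ S.take (k0 + 1)
        let o' := o ++ List.replicate (pvC si ms) ((q.length + (k0 + 1) : Nat) : Int)
        if si = ins then o' ++ [((q.length + (k0 + 1) : Nat) : Int)] else o') out
      = out ++ pvCanon ms ins q S := by
  intro S
  induction S with
  | nil => intro q out; simp [pvCanon]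
  | cons c rest ih =>
    intro q out
    rw [List.length_cons, List.range_succ_eq_map, List.foldl_cons, List.foldl_map]
    have hfold := PySem.List.foldl_congr_mem
      (l := List.range rest.length)
      (init := (let si := q ++ (c :: rest).take (0 + 1)
                let o' := out ++ List.replicate (pvC si ms) ((q.length + (0 + 1) : Nat) : Int)
                if si = ins then o' ++ [((q.length + (0 + 1) : Nat) : Int)] else o'))
      (f := fun (o : List Int) (k0 : Nat) =>
          let si := q ++ (c :: rest).take (k0.succ + 1)
          let o' := o ++ List.replicate (pvC si ms) ((q.length + (k0.succ + 1) : Nat) : Int)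
          if si = ins then o' ++ [((q.length + (k0.succ + 1) : Nat) : Int)] else o')
      (g := fun (o : List Int) (k0 : Nat) =>
          let si := (q ++ [c]) ++ rest.take (k0 + 1)
          let o' := o ++ List.replicate (pvC si ms) (((q ++ [c]).length + (k0 + 1) : Nat) : Int)
          if si = ins then o' ++ [(((q ++ [c]).length + (k0 + 1) : Nat) : Int)] else o')
      (by
        intro o k0 _
        simp only [List.take_succ_cons, List.length_append, List.length_cons, List.length_nil,
          Nat.succ_eq_add_one]
        have h1 : q ++ c :: rest.take (k0 + 1) = (q ++ [c]) ++ rest.take (k0 + 1) := by simp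
        have h2 : q.length + (k0 + 1 + 1) = q.length + 1 + (k0 + 1) := by omega
        rw [h1, h2])
    rw [hfold, ih (q ++ [c])]
    simp only [pvCanon, List.take_succ_cons, List.take_zero]
    have hsi : q ++ [c] ++ [] = q ++ [c] := by simp
    have hlen : ((q ++ [c]).length : Int) = ((q.length + (0 + 1) : Nat) : Int) := by simp
    split_ifs with hx <;> simp_all [List.append_assoc]

theorem some_fn_eq_alt (inc : Int) (dna : String) (motif : String) (max_edit_distance : Int) :
    some_fn inc dna motif max_edit_distance = some_fn_alt inc dna motif max_edit_distance := by
  unfold some_fn some_fn_alt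
  dsimp only
  set ds := dna.toList
  set ms := motif.toList
  set g : Int → Char := fun i => (PySem.Chars.pyGet? ds i).getD ' ' with hg
  set S := (PySem.List.pyRange inc (ds.length : Int) 1).map g with hS
  set ins := ms ++ [(PySem.Chars.pyGet? ds ((ms.length : Int) - 1 + max_edit_distance)).getD ' '] with hins
  -- A side
  rw [a_fold_canon]
  -- B side: replace bCount by pvC and the length literal, then fold to pvCanon
  have hB : (List.range S.length).foldl (fun out k0 =>
      let out' := out ++ List.replicate (bCount ((List.range ms.length).map (fun j => lcpAt ms S j S.length 0)) ms.length k0 (ms.length + 1) 0) ((k0 + 1 : Nat) : Int)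
      if S.take (k0 + 1) = ins then out' ++ [((k0 + 1 : Nat) : Int)] else out') [] =
    (List.range S.length).foldl (fun o k0 =>
      let si := ([] : List Char) ++ S.take (k0 + 1)
      let o' := o ++ List.replicate (pvC si ms) ((((List.nil (α := Char)).length + (k0 + 1) : Nat)) : Int)
      if si = ins then o' ++ [(((List.nil (α := Char)).length + (k0 + 1) : Nat) : Int)] else o') [] := by
    apply PySem.List.foldl_congr_mem
    intro acc k0 hmem
    have hk : k0 + 1 ≤ S.length := by
      have := List.mem_range.mp hmem; omega
    simp only [List.nil_append, List.length_nil, Nat.zero_add]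
    rw [bCount_eq_pvC ms S k0 hk (ms.length + 1) 0 (by omega), List.drop_zero]
  rw [hB, b_fold_canon ms ins S [] []]

-- ===== VERDICT (by name: the statement is the Claim_ definition above) =====
theorem some_fn_spec : Claim_equal_some_fn := by
  intro inc dna motif max_edit_distance _ _
  unfold Spec_some_fn
  exact some_fn_eq_alt inc dna motif max_edit_distance
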